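-- pv_equiv track=rewrite | github.com/LuciferK47/arc-z | arc_solver_simple.py | find_color_mapping
-- ===== SOURCE A (Python) =====
-- from typing import List, Dict, Tuple, Any, Optional
--
-- def find_color_mapping(input_grid: List[List[int]], output_grid: List[List[int]]) -> Dict[int, int]:
--     """Find color mapping between input and output grids."""
--     if len(input_grid) != len(output_grid):
--         return {}
--
--     mapping = {}
--     for i in range(len(input_grid)):
--         if len(input_grid[i]) != len(output_grid[i]):
--             return {}
--         for j in range(len(input_grid[i])):
--             in_color = input_grid[i][j]
--             out_color = output_grid[i][j]
--
--             if in_color in mapping: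
--                 if mapping[in_color] != out_color:
--                     return {}  # Inconsistent mapping
--             else:
--                 mapping[in_color] = out_color
--
--     return mapping
-- ===== SOURCE B (Python) =====
-- def find_color_mapping(input_grid, output_grid):
--     """Find color mapping between input and output grids."""
--     if len(input_grid) != len(output_grid):
--         return {}
--     for r, s in zip(input_grid, output_grid):
--         if len(r) != len(s):
--             return {}
--     # Dedup all (input, output) cell pairs in reading order; the relation is a
--     # function iff there are exactly as many distinct pairs as distinct input
--     # colors -- a counting argument, no per-color conflict check anywhere.
--     pairs = [(a, b) for r, s in zip(input_grid, output_grid) for a, b in zip(r, s)]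
--     distinct = list(dict.fromkeys(pairs))
--     if len(distinct) != len({a for a, _ in distinct}):
--         return {}
--     return dict(distinct)
-- ===== Notes on version B (the rewrite author's own statement) =====
-- stated objective: alternative
-- what changed: B replaces A's validate-while-building scan with a dedup-and-count algorithm: it dedups all (input,output) cell pairs in reading order and decides consistency by a single cardinality comparison (#distinct pairs vs #distinct input colors), with no per-color conflict check at all; the mapping is then dict(distinct pairs).
import Mathlib
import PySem

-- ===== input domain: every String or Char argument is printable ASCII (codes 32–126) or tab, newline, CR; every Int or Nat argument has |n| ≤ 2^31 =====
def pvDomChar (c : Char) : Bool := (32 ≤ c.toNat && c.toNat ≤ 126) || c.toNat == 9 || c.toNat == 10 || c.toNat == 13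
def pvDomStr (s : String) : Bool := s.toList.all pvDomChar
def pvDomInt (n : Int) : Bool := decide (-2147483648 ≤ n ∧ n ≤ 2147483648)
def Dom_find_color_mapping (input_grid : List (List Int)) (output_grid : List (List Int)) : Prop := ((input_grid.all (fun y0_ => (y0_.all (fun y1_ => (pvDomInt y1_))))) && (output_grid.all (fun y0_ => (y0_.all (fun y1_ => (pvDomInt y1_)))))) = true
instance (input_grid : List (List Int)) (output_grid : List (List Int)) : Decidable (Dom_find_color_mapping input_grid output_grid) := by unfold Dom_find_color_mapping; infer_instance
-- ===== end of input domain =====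

-- B replaces A's validate-while-building scan with a dedup-and-count algorithm (dedup the cell pairs, decide consistency by one cardinality comparison); same O(n) cost.


-- ===== PORT A =====
-- inner loop: for j in range(len(row)): … with the early 'return {}' modelled as none
def fcmCells : List Int → List Int → PySem.Dict Int Int → Option (PySem.Dict Int Int)
  | a :: as_, b :: bs, m =>
    match m.get? a with
    | some v => if v ≠ b then none else fcmCells as_ bs m
    | none => fcmCells as_ bs (m.insert a b)
  | _, _, m => some m

-- outer loop over rows, with the per-row length check
def fcmRows : List (List Int) → List (List Int) → PySem.Dict Int Int → Option (PySem.Dict Int Int)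
  | r :: rs, s :: ss, m =>
    if r.length ≠ s.length then none
    else
      match fcmCells r s m with
      | none => none
      | some m' => fcmRows rs ss m'
  | _, _, m => some m

def find_color_mapping (input_grid : List (List Int)) (output_grid : List (List Int)) : List (Int × Int) :=
  if input_grid.length ≠ output_grid.length then []
  else
    match fcmRows input_grid output_grid PySem.Dict.empty with
    | none => []
    | some m => m.items

-- ===== PORT B =====
-- dedup-and-count: distinct (in,out) pairs in reading order; consistent iff as many distinct pairs as distinct input colors
def find_color_mapping_alt (input_grid : List (List Int)) (output_grid : List (List Int)) : List (Int × Int) :=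
  if input_grid.length ≠ output_grid.length then []
  else if (input_grid.zip output_grid).any (fun p => p.1.length ≠ p.2.length) then []
  else
    if (PySem.List.dedup ((input_grid.zip output_grid).flatMap (fun p => p.1.zip p.2))).length ≠
        (PySem.Set.ofList ((PySem.List.dedup ((input_grid.zip output_grid).flatMap (fun p => p.1.zip p.2))).map Prod.fst)).length then []
    else (PySem.Dict.ofList (PySem.List.dedup ((input_grid.zip output_grid).flatMap (fun p => p.1.zip p.2)))).items

-- ===== PRECONDITION & SPEC =====
def Spec_find_color_mapping (input_grid : List (List Int)) (output_grid : List (List Int)) (out : List (Int × Int)) : Prop := out = find_color_mapping_alt input_grid output_grid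
instance (input_grid : List (List Int)) (output_grid : List (List Int)) (out : List (Int × Int)) : Decidable (Spec_find_color_mapping input_grid output_grid out) := by unfold Spec_find_color_mapping; infer_instance

-- ===== CLAIM =====
def Claim_equal_find_color_mapping : Prop := ∀ (input_grid : List (List Int)) (output_grid : List (List Int)), Dom_find_color_mapping input_grid output_grid → Spec_find_color_mapping input_grid output_grid (find_color_mapping input_grid output_grid)

-- ===== LEMMAS AND PROOFS =====

-- cell-level form of A's scan (pairs in reading order, early exit = none)
def pvRunA : List (Int × Int) → PySem.Dict Int Int → Option (PySem.Dict Int Int)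
  | [], m => some m
  | q :: qs, m =>
    match m.get? q.1 with
    | some v => if v ≠ q.2 then none else pvRunA qs m
    | none => pvRunA qs (m.insert q.1 q.2)

theorem pvCells_eq (r s : List Int) : ∀ m, fcmCells r s m = pvRunA (r.zip s) m := by
  induction r generalizing s with
  | nil => intro m; cases s <;> rfl
  | cons a as ih =>
    intro m
    cases s with
    | nil => rfl
    | cons b bs =>
      rw [fcmCells, List.zip_cons_cons, pvRunA]
      cases m.get? a with
      | none => exact ih bs _
      | some v => by_cases hv : v ≠ b <;> simp [hv, ih bs]

theorem pvRunA_append (xs ys : List (Int × Int)) :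
    ∀ m, pvRunA (xs ++ ys) m =
      (match pvRunA xs m with | none => none | some m' => pvRunA ys m') := by
  induction xs with
  | nil => intro m; rfl
  | cons q qs ih =>
    intro m
    rw [List.cons_append, pvRunA, pvRunA]
    cases m.get? q.1 with
    | none => exact ih _
    | some v => by_cases hv : v ≠ q.2 <;> simp [hv, ih]

theorem pvRows_ok (ins outs : List (List Int))
    (h : (ins.zip outs).any (fun p => p.1.length ≠ p.2.length) = false) :
    ∀ m, fcmRows ins outs m =
      pvRunA ((ins.zip outs).flatMap (fun p => p.1.zip p.2)) m := by
  induction ins generalizing outs with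
  | nil => intro m; cases outs <;> rfl
  | cons r rs ih =>
    intro m
    cases outs with
    | nil => rfl
    | cons s ss =>
      rw [List.zip_cons_cons] at h ⊢
      simp only [List.any_cons, Bool.or_eq_false_iff] at h
      have hlen : ¬ r.length ≠ s.length := by simpa using h.1
      rw [fcmRows, if_neg hlen, List.flatMap_cons, pvRunA_append, pvCells_eq]
      cases pvRunA (r.zip s) m with
      | none => rfl
      | some m' => exact ih ss h.2 m'

theorem pvRows_mismatch (ins outs : List (List Int))
    (h : (ins.zip outs).any (fun p => p.1.length ≠ p.2.length) = true) :
    ∀ m, fcmRows ins outs m = none := by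
  induction ins generalizing outs with
  | nil => simp [List.zip_nil_left] at h
  | cons r rs ih =>
    intro m
    cases outs with
    | nil => simp [List.zip_nil_right] at h
    | cons s ss =>
      rw [List.zip_cons_cons, List.any_cons, Bool.or_eq_true] at h
      rw [fcmRows]
      by_cases hlen : r.length ≠ s.length
      · rw [if_pos hlen]
      · rw [if_neg hlen]
        have h' : (rs.zip ss).any (fun p => p.1.length ≠ p.2.length) = true := by
          rcases h with h | h
          · exact absurd (by simpa using h) hlen
          · exact h
        cases fcmCells r s m with
        | none => rfl
        | some m' => exact ih ss h' m'

-- MAIN INVARIANT: A's early-exit scan succeeds exactly when the deduped pairs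
-- (state's items followed by the remaining pairs) have pairwise-distinct input
-- colors, and then its state's items ARE that deduped list.
theorem pvMain : ∀ (ps : List (Int × Int)) (m : PySem.Dict Int Int), m.keys.Nodup →
    (if ((PySem.Set.update m.items ps).map Prod.fst).Nodup
     then pvRunA ps m = some ⟨PySem.Set.update m.items ps⟩
     else pvRunA ps m = none) := by
  intro ps
  induction ps with
  | nil =>
    intro m hnd
    rw [PySem.Set.update_nil]
    rw [if_pos (by simpa [PySem.Dict.keys] using hnd)]
    cases m; rfl
  | cons q qs ih =>
    intro m hnd
    obtain ⟨a, b⟩ := q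
    rw [PySem.Set.update_cons]
    cases h : m.get? a with
    | none =>
      have hc : m.contains a = false := by
        rw [PySem.Dict.contains_eq_isSome_get?, h]; rfl
      have hmem : (a, b) ∉ m.items := fun hm => by
        have := PySem.Dict.get?_of_mem_items m hm hnd
        rw [h] at this; simp at this
      have hadd : PySem.Set.add m.items (a, b) = (m.insert a b).items := by
        rw [PySem.Set.add_of_not_mem hmem, PySem.Dict.items_insert_of_not_contains _ _ hc]
      have hrun : pvRunA ((a, b) :: qs) m = pvRunA qs (m.insert a b) := by
        simp [pvRunA, h]
      rw [hadd, hrun]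
      exact ih (m.insert a b) (PySem.Dict.nodup_keys_insert m a b hnd)
    | some v =>
      by_cases hv : v = b
      · subst hv
        have hmem : (a, v) ∈ m.items := PySem.Dict.mem_items_of_get?_eq_some m h
        have hrun : pvRunA ((a, v) :: qs) m = pvRunA qs m := by
          simp [pvRunA, h]
        rw [PySem.Set.add_of_mem hmem, hrun]
        exact ih m hnd
      · have hmem : (a, v) ∈ m.items := PySem.Dict.mem_items_of_get?_eq_some m h
        have h1 : (a, v) ∈ PySem.Set.update (PySem.Set.add m.items (a, b)) qs := by
          rw [PySem.Set.mem_update]; exact Or.inl ((PySem.Set.mem_add _ _ _).2 (Or.inl hmem))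
        have h2 : (a, b) ∈ PySem.Set.update (PySem.Set.add m.items (a, b)) qs := by
          rw [PySem.Set.mem_update]; exact Or.inl ((PySem.Set.mem_add _ _ _).2 (Or.inr rfl))
        have hne : ¬ ((PySem.Set.update (PySem.Set.add m.items (a, b)) qs).map Prod.fst).Nodup := by
          intro hn
          have := List.inj_on_of_nodup_map hn h1 h2 rfl
          exact hv (by injection this)
        rw [if_neg hne]
        simp [pvRunA, h, hv]

theorem pvDiscard_eq_filter (s : PySem.Set Int) (x : Int) :
    PySem.Set.discard s x = s.filter (fun y => !(y == x)) := rfl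

-- a list with a repeat strictly shrinks under set(·)
theorem pvLen_lt (l : List Int) (h : ¬ l.Nodup) :
    (PySem.Set.ofList l).length < l.length := by
  induction l with
  | nil => exact absurd List.nodup_nil h
  | cons x l ih =>
    rw [PySem.Set.ofList_cons, List.length_cons, List.length_cons, pvDiscard_eq_filter]
    rw [List.nodup_cons] at h
    by_cases hx : x ∈ l
    · have h1 : ((PySem.Set.ofList l).filter (fun y => !(y == x))).length <
          (PySem.Set.ofList l).length :=
        List.length_filter_lt_length_iff_exists.2
          ⟨x, (PySem.Set.mem_ofList _ _).2 hx, by simp⟩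
      have h2 := PySem.Set.length_ofList_le l
      omega
    · have hnd : ¬ l.Nodup := fun hn => h ⟨hx, hn⟩
      have h1 : ((PySem.Set.ofList l).filter (fun y => !(y == x))).length ≤
          (PySem.Set.ofList l).length := List.length_filter_le _ _
      have h2 := ih hnd
      omega

-- dict(l) over pairwise-distinct keys returns l itself
theorem pvItems_ofList (l : List (Int × Int)) (h : (l.map Prod.fst).Nodup) :
    (PySem.Dict.ofList l).items = l := by
  have := PySem.Dict.items_foldl_insert_fresh (l := l) (k := Prod.fst) (v := Prod.snd)
    (d := PySem.Dict.empty) (fun a _ => rfl) h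
  simpa using this

-- ===== VERDICT =====
theorem find_color_mapping_spec : Claim_equal_find_color_mapping := by
  intro ins outs _
  unfold Spec_find_color_mapping find_color_mapping find_color_mapping_alt
  by_cases hlen : ins.length ≠ outs.length
  · simp [hlen]
  · rw [if_neg hlen, if_neg hlen]
    cases hany : (ins.zip outs).any (fun p => p.1.length ≠ p.2.length) with
    | true => rw [pvRows_mismatch ins outs hany, if_pos rfl]
    | false =>
      rw [if_neg (by simp), pvRows_ok ins outs hany]
      have hm := pvMain ((ins.zip outs).flatMap (fun p => p.1.zip p.2)) PySem.Dict.empty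
        (by simp [PySem.Dict.keys, PySem.Dict.empty])
      have hup : PySem.Set.update (PySem.Dict.empty : PySem.Dict Int Int).items
          ((ins.zip outs).flatMap (fun p => p.1.zip p.2)) =
          PySem.Set.ofList ((ins.zip outs).flatMap (fun p => p.1.zip p.2)) := rfl
      rw [hup] at hm
      have hded : PySem.List.dedup ((ins.zip outs).flatMap (fun p => p.1.zip p.2)) =
          PySem.Set.ofList ((ins.zip outs).flatMap (fun p => p.1.zip p.2)) :=
        PySem.List.dedup_eq_ofList _
      rw [hded]
      set D := PySem.Set.ofList ((ins.zip outs).flatMap (fun p => p.1.zip p.2)) with hD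
      by_cases hnd : (D.map Prod.fst).Nodup
      · rw [if_pos hnd] at hm
        rw [hm]
        have hlens : D.length = (PySem.Set.ofList (D.map Prod.fst)).length := by
          rw [PySem.Set.ofList_eq_self_of_nodup (D.map Prod.fst) hnd, List.length_map]
        rw [if_neg (by omega), pvItems_ofList D hnd]
      · rw [if_neg hnd] at hm
        rw [hm]
        have h1 : (PySem.Set.ofList (D.map Prod.fst)).length < (D.map Prod.fst).length :=
          pvLen_lt _ hnd
        rw [List.length_map] at h1
        rw [if_pos (by omega)]
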